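-- pv_equiv track=rewrite | github.com/daniel-reich/ubiquitous-fiesta | 6brSyFwWnb9Msu7kX_21.py | pos_neg_sort
-- ===== SOURCE A (Python) =====
-- def pos_neg_sort(lst):
--     for i in range(0,len(lst)):
--         for j in range(i+1,len(lst)):
--             if lst[i]<0 or lst[j]<0:
--                 continue
--             elif lst[j]<lst[i]:
--                 lst[j],lst[i] = lst[i],lst[j]
--     return lst
-- ===== SOURCE B (Python) =====
-- def pos_neg_sort(lst):
--     it = iter(sorted(x for x in lst if x >= 0))
--     return [x if x < 0 else next(it) for x in lst]
-- ===== Notes on version B (the rewrite author's own statement) =====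
-- stated objective: faster
-- what changed: A's quadratic nested index loops (a selection-sort restricted to non-negative slots) are replaced by extracting the non-negative values, sorting them once with the library sort, and reinserting them in order into the positions the negatives do not occupy.
import Mathlib
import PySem

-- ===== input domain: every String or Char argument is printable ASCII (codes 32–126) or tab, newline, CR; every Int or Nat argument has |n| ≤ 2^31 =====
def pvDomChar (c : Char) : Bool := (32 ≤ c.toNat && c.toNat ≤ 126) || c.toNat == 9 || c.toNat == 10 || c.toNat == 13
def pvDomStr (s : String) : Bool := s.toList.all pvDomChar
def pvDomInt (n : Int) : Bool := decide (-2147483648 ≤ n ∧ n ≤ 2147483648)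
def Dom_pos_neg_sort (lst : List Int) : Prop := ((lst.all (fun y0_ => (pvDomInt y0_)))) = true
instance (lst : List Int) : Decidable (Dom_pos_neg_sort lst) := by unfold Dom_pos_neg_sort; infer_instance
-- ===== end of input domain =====

-- B sorts the non-negative values once with the library sort and reinserts them around
-- the negatives, which stay in place, instead of A's quadratic nested index loops.
-- A mutates its argument in place; B builds a fresh list — the equivalence proved here
-- is about the RETURN value only.

-- ===== PORT A =====
-- One iteration of A's inner-loop body: compare lst[i] and lst[j]; skip if either is
-- negative; swap (lst[j],lst[i] = lst[i],lst[j]) if lst[j] < lst[i].  Indices produced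
-- by range(...) are always in range, so getD never hits its default value.
def pvStep (l : List Int) (i j : Nat) : List Int :=
  let a := l.getD i 0
  let b := l.getD j 0
  if a < 0 || b < 0 then l
  else if b < a then (l.set j a).set i b
  else l

-- len(lst) is constant through the loops (item assignment preserves the length).
def pos_neg_sort (lst : List Int) : List Int :=
  (List.range lst.length).foldl
    (fun acc i =>
      (List.range' (i+1) (lst.length - (i+1))).foldl (fun t j => pvStep t i j) acc)
    lst

-- ===== PORT B =====
-- the list comprehension of Source B: negatives kept in place, each non-negative slot takes
-- next(it).  (The [] inner branch is unreachable: the sorted list has exactly one value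
-- per non-negative slot.)
def pvFill : List Int → List Int → List Int
  | [], _ => []
  | x :: xs, s =>
    if x < 0 then x :: pvFill xs s
    else match s with
      | y :: ys => y :: pvFill xs ys
      | [] => []

def pos_neg_sort_alt (lst : List Int) : List Int :=
  pvFill lst (PySem.List.sorted (lst.filter (fun x => decide (0 ≤ x))) (fun x => x) false)

-- ===== PRECONDITION & SPEC =====
def Spec_pos_neg_sort (lst : List Int) (out : List Int) : Prop := out = pos_neg_sort_alt lst
instance (lst : List Int) (out : List Int) : Decidable (Spec_pos_neg_sort lst out) := by unfold Spec_pos_neg_sort; infer_instance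

-- ===== CLAIM (what is proved, stated in full; the proofs are below) =====
def Claim_equal_pos_neg_sort : Prop := ∀ (lst : List Int), Dom_pos_neg_sort lst → Spec_pos_neg_sort lst (pos_neg_sort lst)

-- ===== LEMMAS AND PROOFS =====

-- Structural mirror of A's inner loop with the pivot (lst[i]) pulled out as `a`:
-- it returns the final pivot value and the rewritten suffix.
def pvInner (a : Int) : List Int → Int × List Int
  | [] => (a, [])
  | y :: ys =>
    if a < 0 || y < 0 then
      ((pvInner a ys).1, y :: (pvInner a ys).2)
    else if y < a then
      ((pvInner y ys).1, a :: (pvInner y ys).2)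
    else
      ((pvInner a ys).1, y :: (pvInner a ys).2)

theorem pvInner_length (a : Int) (ys : List Int) : (pvInner a ys).2.length = ys.length := by
  induction ys generalizing a with
  | nil => rfl
  | cons y ys ih => simp only [pvInner]; split_ifs <;> simp [ih]

-- Structural mirror of A's outer loop.
def pvOuter : List Int → List Int
  | [] => []
  | x :: xs => (pvInner x xs).1 :: pvOuter (pvInner x xs).2
termination_by l => l.length
decreasing_by simp [pvInner_length]

-- `r` has `l`'s negatives in place and non-negative entries where `l` has them.
def pvShape : List Int → List Int → Prop
  | [], [] => True
  | x :: xs, y :: ys => (x < 0 → y = x) ∧ (0 ≤ x → 0 ≤ y) ∧ pvShape xs ys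
  | _, _ => False

-- ---- bridging the index-loop port of A to the structural mirror ----

theorem pvGetD_at (pre rest : List Int) (a : Int) :
    (pre ++ a :: rest).getD pre.length 0 = a := by
  rw [List.getD_append_right pre (a :: rest) 0 pre.length le_rfl]; simp

theorem pvSet_at (pre rest : List Int) (a v : Int) :
    (pre ++ a :: rest).set pre.length v = pre ++ v :: rest := by
  rw [List.set_append]
  simp

theorem pvInner_bridge (ys : List Int) (a : Int) (pre mid : List Int) :
    (List.range' (pre.length + 1 + mid.length) ys.length).foldl
      (fun t j => pvStep t pre.length j) (pre ++ a :: (mid ++ ys))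
    = pre ++ (pvInner a ys).1 :: (mid ++ (pvInner a ys).2) := by
  induction ys generalizing a mid with
  | nil => simp [pvInner]
  | cons y ys ih =>
    rw [List.length_cons, List.range'_succ]
    simp only [List.foldl_cons]
    have hga : (pre ++ a :: (mid ++ y :: ys)).getD pre.length 0 = a := pvGetD_at ..
    have e1 : pre ++ a :: (mid ++ y :: ys) = (pre ++ a :: mid) ++ y :: ys := by simp
    have hlen : (pre ++ a :: mid).length = pre.length + 1 + mid.length := by
      simp; omega
    have hgb : (pre ++ a :: (mid ++ y :: ys)).getD (pre.length + 1 + mid.length) 0 = y := by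
      rw [e1, ← hlen]; exact pvGetD_at ..
    have hmidlen : pre.length + 1 + mid.length + 1 = pre.length + 1 + (mid ++ [y]).length := by
      simp; omega
    have hmidlen' : pre.length + 1 + mid.length + 1 = pre.length + 1 + (mid ++ [a]).length := by
      simp; omega
    by_cases h1 : a < 0 ∨ y < 0
    · have hb : (decide (a < 0) || decide (y < 0)) = true := by
        simpa [decide_eq_true_iff] using h1
      have hstep : pvStep (pre ++ a :: (mid ++ y :: ys)) pre.length
          (pre.length + 1 + mid.length) = pre ++ a :: ((mid ++ [y]) ++ ys) := by
        simp only [pvStep, hga, hgb, hb, if_true]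
        simp
      rw [hstep, hmidlen, ih a (mid ++ [y])]
      simp only [pvInner, hb, if_true]
      simp
    · have hb : (decide (a < 0) || decide (y < 0)) = false := by
        simp only [not_or, not_lt] at h1
        simp [not_lt.mpr h1.1, not_lt.mpr h1.2]
      by_cases h2 : y < a
      · have hstep : pvStep (pre ++ a :: (mid ++ y :: ys)) pre.length
            (pre.length + 1 + mid.length) = pre ++ y :: ((mid ++ [a]) ++ ys) := by
          simp only [pvStep, hga, hgb, hb, Bool.false_eq_true, if_false, if_pos h2]
          rw [e1, ← hlen, pvSet_at]
          have e3 : (pre ++ a :: mid) ++ a :: ys = pre ++ a :: (mid ++ a :: ys) := by simp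
          rw [e3, pvSet_at]
          simp
        rw [hstep, hmidlen', ih y (mid ++ [a])]
        simp only [pvInner, hb, Bool.false_eq_true, if_false, if_pos h2]
        simp
      · have hstep : pvStep (pre ++ a :: (mid ++ y :: ys)) pre.length
            (pre.length + 1 + mid.length) = pre ++ a :: ((mid ++ [y]) ++ ys) := by
          simp only [pvStep, hga, hgb, hb, Bool.false_eq_true, if_false, if_neg h2]
          simp
        rw [hstep, hmidlen, ih a (mid ++ [y])]
        simp only [pvInner, hb, Bool.false_eq_true, if_false, if_neg h2]
        simp

theorem pvOuter_bridge (k n : Nat) : ∀ (l pre : List Int), l.length = k →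
    n = pre.length + l.length →
    (List.range' pre.length l.length).foldl
      (fun acc i => (List.range' (i+1) (n - (i+1))).foldl (fun t j => pvStep t i j) acc)
      (pre ++ l)
    = pre ++ pvOuter l := by
  induction k with
  | zero =>
    intro l pre hk _
    rw [List.length_eq_zero_iff.mp hk]
    simp [pvOuter]
  | succ k ih =>
    intro l pre hk hn
    match l with
    | x :: xs =>
      rw [List.length_cons, List.range'_succ]
      simp only [List.foldl_cons]
      have hcount : n - (pre.length + 1) = xs.length := by
        simp only [List.length_cons] at hn; omega
      have hb := pvInner_bridge xs x pre []
      simp only [List.nil_append, List.length_nil, Nat.add_zero] at hb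
      rw [hcount, hb]
      have hxs2 : (pvInner x xs).2.length = xs.length := pvInner_length ..
      have e1 : pre ++ (pvInner x xs).1 :: (pvInner x xs).2
          = (pre ++ [(pvInner x xs).1]) ++ (pvInner x xs).2 := by simp
      have e2 : pre.length + 1 = (pre ++ [(pvInner x xs).1]).length := by simp
      have e3 : xs.length = (pvInner x xs).2.length := hxs2.symm
      rw [e1, e3, e2, ih (pvInner x xs).2 (pre ++ [(pvInner x xs).1])
        (by simp only [List.length_cons] at hk; omega)
        (by simp only [List.length_append, List.length_cons, List.length_nil] at hn ⊢; omega)]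
      rw [show pvOuter (x :: xs) = (pvInner x xs).1 :: pvOuter (pvInner x xs).2 from by
        rw [pvOuter]]
      simp

theorem pos_neg_sort_eq_pvOuter (lst : List Int) : pos_neg_sort lst = pvOuter lst := by
  have := pvOuter_bridge lst.length lst.length lst [] rfl (by simp)
  simpa [pos_neg_sort, List.range_eq_range'] using this

-- ---- properties of the structural mirror ----

theorem pvInner_neg (a : Int) (ys : List Int) (h : a < 0) : pvInner a ys = (a, ys) := by
  induction ys generalizing a with
  | nil => rfl
  | cons y ys ih =>
    simp only [pvInner]
    rw [if_pos (by simp [h])]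
    simp [ih a h]

theorem pvInner_shape (a : Int) (ys : List Int) :
    pvShape ys (pvInner a ys).2 ∧ (a < 0 → (pvInner a ys).1 = a) ∧
      (0 ≤ a → 0 ≤ (pvInner a ys).1) := by
  induction ys generalizing a with
  | nil => exact ⟨trivial, fun _ => rfl, fun h => h⟩
  | cons y ys ih =>
    simp only [pvInner]
    split_ifs with h1 h2
    · simp only [Bool.or_eq_true, decide_eq_true_iff] at h1
      exact ⟨⟨fun _ => rfl, fun h => h, (ih a).1⟩, (ih a).2.1, (ih a).2.2⟩
    · simp only [Bool.or_eq_true, decide_eq_true_iff, not_or, not_lt] at h1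
      refine ⟨⟨fun hy => absurd hy (not_lt.mpr h1.2), fun _ => h1.1, (ih y).1⟩, ?_, ?_⟩
      · intro ha; exact absurd ha (not_lt.mpr h1.1)
      · intro _; exact (ih y).2.2 h1.2
    · simp only [Bool.or_eq_true, decide_eq_true_iff, not_or, not_lt] at h1
      exact ⟨⟨fun hy => absurd hy (not_lt.mpr h1.2), fun _ => h1.2, (ih a).1⟩, (ih a).2.1, (ih a).2.2⟩

theorem pvInner_perm (a : Int) (ys : List Int) :
    ((pvInner a ys).1 :: (pvInner a ys).2).Perm (a :: ys) := by
  induction ys generalizing a with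
  | nil => exact List.Perm.refl _
  | cons y ys ih =>
    simp only [pvInner]
    split_ifs with h1 h2
    · exact ((List.Perm.swap y (pvInner a ys).1 (pvInner a ys).2).trans
        ((ih a).cons y)).trans (List.Perm.swap a y ys)
    · exact (List.Perm.swap a (pvInner y ys).1 (pvInner y ys).2).trans ((ih y).cons a)
    · exact ((List.Perm.swap y (pvInner a ys).1 (pvInner a ys).2).trans
        ((ih a).cons y)).trans (List.Perm.swap a y ys)

theorem pvInner_min (a : Int) (ys : List Int) (ha : 0 ≤ a) :
    (pvInner a ys).1 ≤ a ∧ ∀ b ∈ (pvInner a ys).2, 0 ≤ b → (pvInner a ys).1 ≤ b := by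
  induction ys generalizing a with
  | nil => simp only [pvInner]; exact ⟨le_rfl, by simp⟩
  | cons y ys ih =>
    simp only [pvInner]
    split_ifs with h1 h2
    · simp only [Bool.or_eq_true, decide_eq_true_iff] at h1
      have hy : y < 0 := h1.resolve_left (not_lt.mpr ha)
      refine ⟨(ih a ha).1, ?_⟩
      intro b hb h0b
      rcases List.mem_cons.mp hb with rfl | hb
      · exact absurd h0b (not_le.mpr hy)
      · exact (ih a ha).2 b hb h0b
    · simp only [Bool.or_eq_true, decide_eq_true_iff, not_or, not_lt] at h1
      refine ⟨le_of_lt (lt_of_le_of_lt (ih y h1.2).1 h2), ?_⟩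
      intro b hb h0b
      rcases List.mem_cons.mp hb with rfl | hb
      · exact le_of_lt (lt_of_le_of_lt (ih y h1.2).1 h2)
      · exact (ih y h1.2).2 b hb h0b
    · simp only [Bool.or_eq_true, decide_eq_true_iff, not_or, not_lt] at h1
      refine ⟨(ih a ha).1, ?_⟩
      intro b hb h0b
      rcases List.mem_cons.mp hb with rfl | hb
      · exact le_trans (ih a ha).1 (not_lt.mp h2)
      · exact (ih a ha).2 b hb h0b

theorem pvShape_trans (l m r : List Int) (h1 : pvShape l m) (h2 : pvShape m r) :
    pvShape l r := by
  induction l generalizing m r with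
  | nil => cases m <;> cases r <;> simp_all [pvShape]
  | cons x xs ih =>
    cases m with
    | nil => exact absurd h1 (by simp [pvShape])
    | cons y ys =>
      cases r with
      | nil => exact absurd h2 (by simp [pvShape])
      | cons z zs =>
        obtain ⟨a1, a2, a3⟩ := h1
        obtain ⟨b1, b2, b3⟩ := h2
        refine ⟨?_, fun hx => b2 (a2 hx), ih ys zs a3 b3⟩
        intro hx
        have hy : y = x := a1 hx
        have hz : z = y := b1 (hy ▸ hx)
        rw [hz, hy]

theorem pvOuter_shape (l : List Int) : pvShape l (pvOuter l) := by
  fun_induction pvOuter with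
  | case1 => trivial
  | case2 x xs ih =>
    have hs := pvInner_shape x xs
    exact ⟨fun hx => (pvInner_neg x xs hx ▸ rfl : (pvInner x xs).1 = x), hs.2.2,
      pvShape_trans xs (pvInner x xs).2 _ hs.1 ih⟩

theorem pvOuter_perm (l : List Int) : (pvOuter l).Perm l := by
  fun_induction pvOuter with
  | case1 => exact List.Perm.refl _
  | case2 x xs ih =>
    exact (ih.cons (pvInner x xs).1).trans (pvInner_perm x xs)

theorem pvOuter_sorted (l : List Int) :
    ((pvOuter l).filter (fun x => decide (0 ≤ x))).Pairwise (· ≤ ·) := by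
  fun_induction pvOuter with
  | case1 => simp
  | case2 x xs ih =>
    by_cases hx : x < 0
    · rw [pvInner_neg x xs hx] at *
      simpa [List.filter_cons, not_le.mpr hx] using ih
    · have ha : 0 ≤ (pvInner x xs).1 := (pvInner_shape x xs).2.2 (not_lt.mp hx)
      rw [List.filter_cons, if_pos (by simpa using ha)]
      refine List.Pairwise.cons ?_ ih
      intro b hb
      obtain ⟨hbm, hb0⟩ := List.mem_filter.mp hb
      have hbxs2 : b ∈ (pvInner x xs).2 := (pvOuter_perm _).mem_iff.mp hbm
      exact (pvInner_min x xs (not_lt.mp hx)).2 b hbxs2 (by simpa using hb0)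

-- ---- the reinsertion characterisation of B ----

theorem pvFill_of_shape (l r : List Int) (h : pvShape l r) :
    pvFill l (r.filter (fun x => decide (0 ≤ x))) = r := by
  induction l generalizing r with
  | nil =>
    cases r with
    | nil => rfl
    | cons z zs => exact absurd h (by simp [pvShape])
  | cons x xs ih =>
    cases r with
    | nil => exact absurd h (by simp [pvShape])
    | cons y ys =>
      obtain ⟨h1, h2, h3⟩ := h
      by_cases hx : x < 0
      · have hy : y = x := h1 hx
        rw [List.filter_cons, if_neg (by simp [hy, not_le.mpr hx])]
        simp only [pvFill, if_pos hx]
        rw [ih ys h3, hy]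
      · have hy : 0 ≤ y := h2 (not_lt.mp hx)
        rw [List.filter_cons, if_pos (by simpa using hy)]
        simp only [pvFill, if_neg hx]
        rw [ih ys h3]

-- ===== VERDICT (by name: the statement is the Claim_ definition above) =====
theorem pos_neg_sort_spec : Claim_equal_pos_neg_sort := by
  intro lst _
  unfold Spec_pos_neg_sort pos_neg_sort_alt
  rw [pos_neg_sort_eq_pvOuter]
  have hperm : ((pvOuter lst).filter (fun x => decide (0 ≤ x))).Perm
      (lst.filter (fun x => decide (0 ≤ x))) := (pvOuter_perm lst).filter _
  rw [PySem.List.sorted_id_eq_of_perm_of_pairwise _ _ hperm (pvOuter_sorted lst)]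
  exact (pvFill_of_shape lst (pvOuter lst) (pvOuter_shape lst)).symm
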